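-- pv_equiv track=rewrite | github.com/smmathewson/Project-Database | SamuelM_Minimax_DotsBoxes_MLAI.py | make_list_rep
-- ===== SOURCE A (Python) =====
-- def make_list_rep(size):
--
--     environment = []
--     # every size * 2 index, ex. size * 2 + size * 2 + size * 2 until the
--     # end of the point row, so the next row are vertical lines within the box representation
--
--     for r in range(0, size * 2 + 1):
--         # if the row is even, then we have a star and horizontal connection row
--
--         if r % 2 == 0:
--             for c in range(0, size * 2 + 1):
--                 if c % 2 == 0:  # it's an even space so it's a dot
--                     environment.append("*")
--                 else:
--                     # odd index within even row: ?
--                     environment.append("?")  # empty spot able to be drawn a line across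
--         else:
--             # odd row so this is vertical and space
--             for c in range(0, size * 2 + 1):
--                 if c % 2 == 0:  # it's an even space so it's a dot
--                     environment.append("?")  # possible vertical move, when print, all ? will print as empty strings
--                 else:
--                     environment.append(" ")  # empty space between vertical movements
--
--     # return the created initial environment
--     return environment
-- ===== SOURCE B (Python) =====
-- def make_list_rep(size):
--     if size < 0:
--         return []
--     even_row = ["*", "?"] * size + ["*"]
--     odd_row = ["?", " "] * size + ["?"]
--     return even_row + (odd_row + even_row) * size
-- ===== Notes on version B (the rewrite author's own statement) =====
-- stated objective: simpler
-- what changed: Replaces the nested per-cell parity loops with whole-row pattern replication: two row templates built by list multiplication and concatenated as even_row + (odd_row + even_row) * size.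
import Mathlib
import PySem

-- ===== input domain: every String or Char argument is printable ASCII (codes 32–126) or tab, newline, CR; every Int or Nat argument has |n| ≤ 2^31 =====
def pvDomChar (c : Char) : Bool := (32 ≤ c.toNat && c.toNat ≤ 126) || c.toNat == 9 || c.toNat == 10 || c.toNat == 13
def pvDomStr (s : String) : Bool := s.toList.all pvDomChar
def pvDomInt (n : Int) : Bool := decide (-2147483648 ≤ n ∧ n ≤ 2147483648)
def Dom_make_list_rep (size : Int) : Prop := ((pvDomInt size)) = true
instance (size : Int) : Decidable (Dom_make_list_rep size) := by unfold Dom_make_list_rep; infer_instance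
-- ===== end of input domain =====

-- B builds the grid by replicating two row templates instead of A's nested per-cell parity loops (objective: simpler).

-- ===== PORT A =====
def make_list_rep (size : Int) : List String :=
  (PySem.List.pyRange 0 (size * 2 + 1) 1).foldl (fun environment r =>
    if PySem.Int.mod r 2 = 0 then
      (PySem.List.pyRange 0 (size * 2 + 1) 1).foldl (fun env c =>
        if PySem.Int.mod c 2 = 0 then env ++ ["*"] else env ++ ["?"]) environment
    else
      (PySem.List.pyRange 0 (size * 2 + 1) 1).foldl (fun env c =>
        if PySem.Int.mod c 2 = 0 then env ++ ["?"] else env ++ [" "]) environment) []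

-- ===== PORT B =====
-- Python list multiplication: xs * n (empty for n ≤ 0)
def pyListMul {α : Type} (xs : List α) (n : Int) : List α :=
  (List.replicate n.toNat xs).flatten

def make_list_rep_alt (size : Int) : List String :=
  if size < 0 then []
  else
    let even_row := pyListMul ["*", "?"] size ++ ["*"]
    let odd_row := pyListMul ["?", " "] size ++ ["?"]
    even_row ++ pyListMul (odd_row ++ even_row) size

-- ===== PRECONDITION & SPEC =====
def Spec_make_list_rep (size : Int) (out : List String) : Prop := out = make_list_rep_alt size
instance (size : Int) (out : List String) : Decidable (Spec_make_list_rep size out) := by unfold Spec_make_list_rep; infer_instance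

-- ===== CLAIM (what is proved, stated in full; the proofs are below) =====
def Claim_equal_make_list_rep : Prop := ∀ (size : Int), Dom_make_list_rep size → Spec_make_list_rep size (make_list_rep size)

-- ===== LEMMAS AND PROOFS =====

-- the inner column loop appends the row pattern [x,y,x,y,…,x] of length 2k+1
lemma inner_fold (x y : String) (k : Nat) (env : List String) :
    (PySem.List.pyRange 0 (2 * (k : Int) + 1) 1).foldl (fun env c =>
        if PySem.Int.mod c 2 = 0 then env ++ [x] else env ++ [y]) env
      = env ++ (List.replicate k [x, y]).flatten ++ [x] := by
  induction k generalizing env with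
  | zero =>
      have h0 : PySem.List.pyRange 0 1 = [0] := by
        simpa using PySem.List.pyRange_one_singleton 0
      simp [h0, PySem.Int.mod]
  | succ k ih =>
      have h1 : (2 * ((k + 1 : Nat) : Int) + 1) = (2 * (k : Int) + 2) + 1 := by push_cast; ring
      have h2 : (2 * (k : Int) + 2) = (2 * (k : Int) + 1) + 1 := by ring
      rw [h1, PySem.List.pyRange_one_succ_right (b := 2 * (k : Int) + 2) (by omega),
          h2, PySem.List.pyRange_one_succ_right (b := 2 * (k : Int) + 1) (by omega)]
      have hodd : PySem.Int.mod (2 * (k : Int) + 1) 2 = 1 := by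
        rw [PySem.Int.mod_eq_emod_of_pos (by norm_num)]; omega
      have heven : PySem.Int.mod (2 * (k : Int) + 1 + 1) 2 = 0 := by
        rw [PySem.Int.mod_eq_emod_of_pos (by norm_num)]; omega
      simp only [List.foldl_append, List.foldl_cons, List.foldl_nil, ih, hodd, heven,
        List.replicate_succ', List.flatten_append]
      simp

-- the outer loop over 2j+1 rows produces even_row followed by j copies of (odd_row ++ even_row)
lemma outer_fold (k j : Nat) (env : List String) :
    (PySem.List.pyRange 0 (2 * (j : Int) + 1) 1).foldl (fun environment r =>
        if PySem.Int.mod r 2 = 0 then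
          (PySem.List.pyRange 0 (2 * (k : Int) + 1) 1).foldl (fun env c =>
            if PySem.Int.mod c 2 = 0 then env ++ ["*"] else env ++ ["?"]) environment
        else
          (PySem.List.pyRange 0 (2 * (k : Int) + 1) 1).foldl (fun env c =>
            if PySem.Int.mod c 2 = 0 then env ++ ["?"] else env ++ [" "]) environment) env
      = env ++ ((List.replicate k ["*", "?"]).flatten ++ ["*"])
          ++ (List.replicate j (((List.replicate k ["?", " "]).flatten ++ ["?"])
                ++ ((List.replicate k ["*", "?"]).flatten ++ ["*"]))).flatten := by
  induction j generalizing env with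
  | zero =>
      have h0 : PySem.List.pyRange 0 1 = [0] := by
        simpa using PySem.List.pyRange_one_singleton 0
      simp only [Nat.cast_zero, mul_zero, zero_add, h0, List.foldl_cons, List.foldl_nil]
      rw [if_pos (by simp [PySem.Int.mod]), inner_fold]
      simp
  | succ j ih =>
      have h1 : (2 * ((j + 1 : Nat) : Int) + 1) = (2 * (j : Int) + 2) + 1 := by push_cast; ring
      have h2 : (2 * (j : Int) + 2) = (2 * (j : Int) + 1) + 1 := by ring
      rw [h1, PySem.List.pyRange_one_succ_right (b := 2 * (j : Int) + 2) (by omega),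
          h2, PySem.List.pyRange_one_succ_right (b := 2 * (j : Int) + 1) (by omega)]
      have hodd : PySem.Int.mod (2 * (j : Int) + 1) 2 = 1 := by
        rw [PySem.Int.mod_eq_emod_of_pos (by norm_num)]; omega
      have heven : PySem.Int.mod (2 * (j : Int) + 1 + 1) 2 = 0 := by
        rw [PySem.Int.mod_eq_emod_of_pos (by norm_num)]; omega
      rw [List.foldl_append, List.foldl_append, List.foldl_cons, List.foldl_nil,
          List.foldl_cons, List.foldl_nil, ih, hodd, heven]
      rw [if_neg one_ne_zero, if_pos rfl, inner_fold, inner_fold]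
      simp only [List.replicate_succ', List.flatten_append]
      simp

-- ===== VERDICT (by name: the statement is the Claim_ definition above) =====
theorem make_list_rep_spec : Claim_equal_make_list_rep := by
  intro size _
  unfold Spec_make_list_rep make_list_rep make_list_rep_alt
  by_cases hneg : size < 0
  · rw [if_pos hneg, PySem.List.pyRange_one_eq_nil (by omega)]
    simp
  · rw [if_neg hneg]
    obtain ⟨k, hk⟩ := Int.eq_ofNat_of_zero_le (by omega : (0 : Int) ≤ size)
    subst hk
    have hm : (k : Int) * 2 + 1 = 2 * (k : Int) + 1 := by ring
    rw [hm, outer_fold k k []]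
    simp [pyListMul]
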